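-- pv_equiv track=rewrite | github.com/fengidri/wind | pyplugin/better_edit.py | align_fun
-- ===== SOURCE A (Python) =====
-- def align_fun(lines, tag = ' '):
--     lines = [align_split(line) for line in lines]
--     max_len = 0
--     for line in lines:
--         max_len = max(max_len, len(line))
--
--     max_len_list = [0] * max_len
--     for line in lines:
--         for i, w in enumerate(line):
--             max_len_list[i] = max(max_len_list[i], len(w))
--     for line in lines:
--         for i, w in enumerate(line):
--             if i == 0:
--                 line[i] = w.rstrip().ljust(max_len_list[i])
--             else:
--                 line[i] = w.strip().ljust(max_len_list[i])
--     lines = [' '.join(line).rstrip() for line in lines]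
--     return lines
--
-- def align_split(line):
--     start = 1
--     split_list = []
--     buf = []
--     for i in line:
--         if start ==  1:
--             buf.append(i)
--             if not(i in '\t '):
--                 start = 0
--         else:
--             if i in '\t ':
--                 if len(buf) >0:
--                     split_list.append(''.join(buf))
--                     del buf[:]
--             else:
--                 buf.append(i)
--     if len(buf) >0:
--         split_list.append(''.join(buf))
--         del buf[:]
--     return split_list
-- ===== SOURCE B (Python) =====
-- # B: column-major streaming build -- no per-column width table and no per-row
-- # enumerate/join pass: the output strings are grown column by column, and the
-- # tokenizer is a span scanner (leading-whitespace prefix + word spans) instead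
-- # of A's per-character state machine.
-- def align_fun(lines, tag = ' '):
--     rows = [align_split(line) for line in lines]
--     out = [''] * len(rows)
--     for col in range(max(map(len, rows), default=0)):
--         width = max(len(r[col]) for r in rows if col < len(r))
--         out = [o if len(r) <= col
--                else (r[col].rstrip().ljust(width) if col == 0
--                      else o + ' ' + r[col].strip().ljust(width))
--                for o, r in zip(out, rows)]
--     return [s.rstrip() for s in out]
--
-- def align_split(line):
--     ws = '\t '
--     i = 0
--     while i < len(line) and line[i] in ws:
--         i += 1
--     if i == len(line):
--         return [line] if line else []
--     toks = []
--     first = True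
--     while i < len(line):
--         j = i
--         while j < len(line) and line[j] not in ws:
--             j += 1
--         toks.append(line[:j] if first else line[i:j])
--         first = False
--         while j < len(line) and line[j] in ws:
--             j += 1
--         i = j
--     return toks
-- ===== Notes on version B (the rewrite author's own statement) =====
-- stated objective: alternative
-- what changed: B tokenizes with a span scanner (leading-whitespace prefix plus word spans by index) instead of A's per-character flag/buffer state machine, and builds the output column by column in one streaming pass (computing each column's width as it goes and appending the padded token to every row's growing string), instead of A's row-major passes that first fill a max_len_list width table and then mutate each token list in place before joining.
import Mathlib
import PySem

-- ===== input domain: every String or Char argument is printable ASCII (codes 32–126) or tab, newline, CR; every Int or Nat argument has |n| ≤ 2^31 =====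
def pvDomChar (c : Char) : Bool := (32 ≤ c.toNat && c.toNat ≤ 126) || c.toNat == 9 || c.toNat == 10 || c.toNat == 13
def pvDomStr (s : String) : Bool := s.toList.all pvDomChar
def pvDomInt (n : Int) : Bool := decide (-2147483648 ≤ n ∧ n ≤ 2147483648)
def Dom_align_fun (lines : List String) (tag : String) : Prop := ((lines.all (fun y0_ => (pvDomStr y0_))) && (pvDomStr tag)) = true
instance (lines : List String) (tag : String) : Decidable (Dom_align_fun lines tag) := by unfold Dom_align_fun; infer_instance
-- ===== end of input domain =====

-- B tokenizes with a span scanner (whitespace prefix + word spans) instead of A's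
-- per-character flag/buffer state machine, and builds the output column by column in one
-- streaming pass (no width table, no per-row enumerate/join pass) (objective: alternative).
-- A mutates its local token lists in place, which a caller cannot observe
-- (the argument `lines` itself is never mutated); both versions ignore `tag`.

-- ===== PORT A =====
-- A's align_split: per-character state machine, state (start, split_list, buf);
-- ''.join(buf) over chars = String.ofList buf (exact)
def alignSplit (line : String) : List String :=
  let st := line.toList.foldl
    (fun (s : Nat × List String × List Char) i =>
      let (start, sl, buf) := s
      if start == 1 then
        let buf := buf ++ [i]
        if !(PySem.Str.isIn (String.ofList [i]) "\t ") then (0, sl, buf) else (1, sl, buf)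
      else
        if PySem.Str.isIn (String.ofList [i]) "\t " then
          if buf.length > 0 then (0, sl ++ [String.ofList buf], []) else (0, sl, buf)
        else (0, sl, buf ++ [i]))
    (1, [], [])
  if st.2.2.length > 0 then st.2.1 ++ [String.ofList st.2.2] else st.2.1

-- shared helper: str.ljust(w) with spaces (pads only when shorter; exact)
def pvLjust (s : String) (w : Nat) : String :=
  String.ofList (s.toList ++ List.replicate (w - s.toList.length) ' ')

-- port of A (len(str) ported as .toList.length, the exact code-point count); enumerate
-- indices are ≥ 0, so .toNat is exact; the reads max_len_list[i] / line[i] are always in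
-- range, so List.getD is exact
def align_fun (lines : List String) (tag : String) : List String :=
  let lines1 := lines.map alignSplit
  let max_len := lines1.foldl (fun m l => max m l.length) 0
  let mll := lines1.foldl
    (fun acc line =>
      (PySem.List.enumerate line).foldl
        (fun a (p : Int × String) =>
          a.set p.1.toNat (max (a.getD p.1.toNat 0) (p.2.toList.length))) acc)
    (List.replicate max_len 0)
  let lines2 := lines1.map (fun line =>
    (PySem.List.enumerate line).foldl
      (fun l (p : Int × String) =>
        l.set p.1.toNat
          (if p.1 == 0 then pvLjust (PySem.Str.rstrip p.2) (mll.getD p.1.toNat 0)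
           else pvLjust (PySem.Str.strip p.2) (mll.getD p.1.toNat 0))) line)
  lines2.map (fun l => PySem.Str.rstrip (PySem.Str.join " " l))

-- ===== PORT B =====
-- termination of B's span loop: each round consumes at least the head character
theorem pvDropDrop_lt (c : Char) (cs : List Char) :
    (((c :: cs).dropWhile (fun x => !(x == '\t' || x == ' '))).dropWhile
        (fun x => x == '\t' || x == ' ')).length < (c :: cs).length := by
  have h1 := List.length_dropWhile_le (fun x => !(x == '\t' || x == ' ')) cs
  have h2 := List.length_dropWhile_le (fun x => x == '\t' || x == ' ')
      (cs.dropWhile (fun x => !(x == '\t' || x == ' ')))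
  have h3 := List.length_dropWhile_le (fun x => x == '\t' || x == ' ') cs
  by_cases hc : (c == '\t' || c == ' ') = true
  · rw [List.dropWhile_cons, if_neg (by simp [hc]), List.dropWhile_cons, if_pos hc]
    simp only [List.length_cons]; omega
  · rw [List.dropWhile_cons, if_pos (by simp [hc])]
    simp only [List.length_cons]; omega

-- B's inner span loop: each step takes one word span (takeWhile of non-whitespace,
-- Python's `while j < len and line[j] not in ws`) then skips the whitespace run
-- (`while j < len and line[j] in ws`); recursion = Python's outer `while i < len(line)`
def pvWordsOf : List Char → List (List Char)
  | [] => []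
  | c :: cs =>
    ((c :: cs).takeWhile (fun x => !(x == '\t' || x == ' ')))
      :: pvWordsOf (((c :: cs).dropWhile (fun x => !(x == '\t' || x == ' '))).dropWhile
          (fun x => x == '\t' || x == ' '))
termination_by cs => cs.length
decreasing_by exact pvDropDrop_lt c cs

-- B's align_split: the `first` flag appears as the leading-whitespace prefix attached
-- to the first word (Python appends line[:j] for the first span, line[i:j] after)
def alignSplitB (line : String) : List String :=
  let cs := line.toList
  match cs.dropWhile (fun x => x == '\t' || x == ' ') with
  | [] => if cs.isEmpty then [] else [String.ofList cs]
  | c :: rest =>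
    match pvWordsOf (c :: rest) with
    | [] => []
    | w :: ws' => String.ofList (cs.takeWhile (fun x => x == '\t' || x == ' ') ++ w)
        :: ws'.map String.ofList

-- width of column c: max over the rows that reach column c (the generator max is over a
-- nonempty list of Nats, so foldl max 0 is exact)
def pvColWidth (rows : List (List String)) (c : Nat) : Nat :=
  ((rows.filter (fun t => decide (c < t.length))).map (fun t => (t.getD c "").toList.length)).foldl max 0

-- one column step of B's streaming pass: append column c's padded token to every row
-- string (string concatenation o + ' ' + pad ported on code points, exact)
def pvColStep (rows : List (List String)) (out : List String) (c : Nat) : List String :=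
  let w := pvColWidth rows c
  List.zipWith (fun o r =>
    if r.length ≤ c then o
    else if c == 0 then pvLjust (PySem.Str.rstrip (r.getD c "")) w
    else String.ofList (o.toList ++ ' ' :: (pvLjust (PySem.Str.strip (r.getD c "")) w).toList))
    out rows

-- port of Source B: max(map(len, rows), default=0) ported as foldl max 0 (exact on Nats)
def align_fun_alt (lines : List String) (tag : String) : List String :=
  let rows := lines.map alignSplitB
  let ncols := (rows.map List.length).foldl max 0
  let out := (List.range ncols).foldl (pvColStep rows) (List.replicate rows.length "")
  out.map PySem.Str.rstrip

-- ===== PRECONDITION & SPEC =====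
def Spec_align_fun (lines : List String) (tag : String) (out : List String) : Prop := out = align_fun_alt lines tag
instance (lines : List String) (tag : String) (out : List String) : Decidable (Spec_align_fun lines tag out) := by unfold Spec_align_fun; infer_instance

-- ===== CLAIM (what is proved, stated in full; the proofs are below) =====
def Claim_equal_align_fun : Prop := ∀ (lines : List String) (tag : String), Dom_align_fun lines tag → Spec_align_fun lines tag (align_fun lines tag)

-- ===== LEMMAS AND PROOFS =====

-- abbreviation for A's loop body (literally the lambda in alignSplit) and its final flush
def pvStepA : (Nat × List String × List Char) → Char → (Nat × List String × List Char) :=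
  fun s i =>
    let (start, sl, buf) := s
    if start == 1 then
      let buf := buf ++ [i]
      if !(PySem.Str.isIn (String.ofList [i]) "\t ") then (0, sl, buf) else (1, sl, buf)
    else
      if PySem.Str.isIn (String.ofList [i]) "\t " then
        if buf.length > 0 then (0, sl ++ [String.ofList buf], []) else (0, sl, buf)
      else (0, sl, buf ++ [i])

def pvFinishA (st : Nat × List String × List Char) : List String :=
  if st.2.2.length > 0 then st.2.1 ++ [String.ofList st.2.2] else st.2.1

-- functional description of A's phase-2 machine (start = 0): words with a pending buffer
def pvWordsA : List Char → List Char → List (List Char)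
  | buf, [] => if buf.isEmpty then [] else [buf]
  | buf, c :: cs =>
    if c == '\t' || c == ' ' then
      (if buf.isEmpty then pvWordsA [] cs else buf :: pvWordsA [] cs)
    else pvWordsA (buf ++ [c]) cs

-- functional description of A's phase-1 machine (start = 1)
def pvStartA : List Char → List Char → List (List Char)
  | buf, [] => if buf.isEmpty then [] else [buf]
  | buf, c :: cs =>
    if c == '\t' || c == ' ' then pvStartA (buf ++ [c]) cs else pvWordsA (buf ++ [c]) cs

theorem pvIsIn_char (i : Char) :
    PySem.Chars.isIn [i] ['\t', ' '] = (i == '\t' || i == ' ') := by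
  rw [Bool.eq_iff_iff, PySem.Chars.isIn_iff_infix]
  constructor
  · intro h
    have hm' : i = '\t' ∨ i = ' ' := by simpa using h.sublist.subset (by simp)
    rcases hm' with h1 | h1 <;> simp [h1]
  · intro h
    rcases Bool.or_eq_true_iff.mp h with h1 | h1
    · exact beq_iff_eq.mp h1 ▸ ⟨[], [' '], rfl⟩
    · exact beq_iff_eq.mp h1 ▸ ⟨['\t'], [], rfl⟩

theorem pvPhase2 (cs : List Char) : ∀ (sl : List String) (buf : List Char),
    pvFinishA (cs.foldl pvStepA (0, sl, buf)) = sl ++ (pvWordsA buf cs).map String.ofList := by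
  induction cs with
  | nil =>
      intro sl buf
      cases buf <;> simp [pvFinishA, pvWordsA]
  | cons c cs ih =>
      intro sl buf
      rw [List.foldl_cons]
      by_cases hc : (c == '\t' || c == ' ') = true
      · cases buf with
        | nil =>
            have hstep : pvStepA (0, sl, []) c = (0, sl, []) := by
              simp [pvStepA, pvIsIn_char, hc]
            rw [hstep, ih]
            simp [pvWordsA, hc]
        | cons b bs =>
            have hstep : pvStepA (0, sl, b :: bs) c = (0, sl ++ [String.ofList (b :: bs)], []) := by
              simp [pvStepA, pvIsIn_char, hc]
            rw [hstep, ih]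
            simp [pvWordsA, hc]
      · have hstep : pvStepA (0, sl, buf) c = (0, sl, buf ++ [c]) := by
          simp [pvStepA, pvIsIn_char, hc]
        rw [hstep, ih]
        simp [pvWordsA, hc]

theorem pvPhase1 (cs : List Char) : ∀ (sl : List String) (buf : List Char),
    pvFinishA (cs.foldl pvStepA (1, sl, buf)) = sl ++ (pvStartA buf cs).map String.ofList := by
  induction cs with
  | nil =>
      intro sl buf
      cases buf <;> simp [pvFinishA, pvStartA]
  | cons c cs ih =>
      intro sl buf
      rw [List.foldl_cons]
      by_cases hc : (c == '\t' || c == ' ') = true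
      · have hstep : pvStepA (1, sl, buf) c = (1, sl, buf ++ [c]) := by
          simp [pvStepA, pvIsIn_char, hc]
        rw [hstep, ih]
        simp [pvStartA, hc]
      · have hstep : pvStepA (1, sl, buf) c = (0, sl, buf ++ [c]) := by
          simp [pvStepA, pvIsIn_char, hc]
        rw [hstep, pvPhase2]
        simp [pvStartA, hc]

theorem pvAlignSplit_startA (line : String) :
    alignSplit line = (pvStartA [] line.toList).map String.ofList := by
  have h : alignSplit line = pvFinishA (line.toList.foldl pvStepA (1, [], [])) := rfl
  rw [h, pvPhase1]
  rfl

theorem pvWordsA_prefix (cs : List Char) : ∀ (buf : List Char), buf ≠ [] →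
    pvWordsA buf cs =
      (buf ++ cs.takeWhile (fun x => !(x == '\t' || x == ' ')))
        :: pvWordsA [] (cs.dropWhile (fun x => !(x == '\t' || x == ' '))) := by
  induction cs with
  | nil =>
      intro buf h
      simp [pvWordsA, h]
  | cons c cs ih =>
      intro buf h
      by_cases hc : (c == '\t' || c == ' ') = true
      · have ht : (c :: cs).takeWhile (fun x => !(x == '\t' || x == ' ')) = [] := by
          rw [List.takeWhile_cons]; simp [hc]
        have hdr : (c :: cs).dropWhile (fun x => !(x == '\t' || x == ' ')) = c :: cs := by
          rw [List.dropWhile_cons]; simp [hc]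
        have hl : pvWordsA buf (c :: cs) = buf :: pvWordsA [] cs := by
          simp [pvWordsA, hc, List.isEmpty_iff, h]
        have hr2 : pvWordsA [] (c :: cs) = pvWordsA [] cs := by
          simp [pvWordsA, hc]
        rw [ht, hdr, hl, hr2]
        simp
      · have ht : (c :: cs).takeWhile (fun x => !(x == '\t' || x == ' '))
            = c :: cs.takeWhile (fun x => !(x == '\t' || x == ' ')) := by
          rw [List.takeWhile_cons]; simp [hc]
        have hdr : (c :: cs).dropWhile (fun x => !(x == '\t' || x == ' '))
            = cs.dropWhile (fun x => !(x == '\t' || x == ' ')) := by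
          rw [List.dropWhile_cons]; simp [hc]
        have hstep : pvWordsA buf (c :: cs) = pvWordsA (buf ++ [c]) cs := by
          simp [pvWordsA, hc]
        rw [ht, hdr, hstep, ih (buf ++ [c]) (by simp)]
        simp

theorem pvWords_eq (n : Nat) : ∀ (cs : List Char), cs.length ≤ n →
    pvWordsA [] cs = pvWordsOf (cs.dropWhile (fun x => x == '\t' || x == ' ')) := by
  induction n with
  | zero =>
      intro cs h
      have : cs = [] := List.eq_nil_of_length_eq_zero (Nat.le_zero.mp h)
      subst this
      simp [pvWordsA, pvWordsOf]
  | succ n ih =>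
      intro cs h
      cases cs with
      | nil => simp [pvWordsA, pvWordsOf]
      | cons c cs' =>
          by_cases hc : (c == '\t' || c == ' ') = true
          · have h1 : pvWordsA [] (c :: cs') = pvWordsA [] cs' := by
              simp [pvWordsA, hc]
            rw [h1, List.dropWhile_cons, if_pos hc]
            exact ih cs' (by simpa using Nat.le_of_succ_le_succ h)
          · have ht : (c :: cs').takeWhile (fun x => !(x == '\t' || x == ' '))
                = c :: cs'.takeWhile (fun x => !(x == '\t' || x == ' ')) := by
              rw [List.takeWhile_cons]; simp [hc]
            have hdq : (c :: cs').dropWhile (fun x => !(x == '\t' || x == ' '))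
                = cs'.dropWhile (fun x => !(x == '\t' || x == ' ')) := by
              rw [List.dropWhile_cons]; simp [hc]
            have h1 : pvWordsA [] (c :: cs') = pvWordsA [c] cs' := by
              simp [pvWordsA, hc]
            have hlen : (cs'.dropWhile (fun x => !(x == '\t' || x == ' '))).length ≤ n :=
              le_trans (List.length_dropWhile_le _ _) (by simpa using Nat.le_of_succ_le_succ h)
            have h2 := ih (cs'.dropWhile (fun x => !(x == '\t' || x == ' '))) hlen
            rw [List.dropWhile_cons, if_neg hc, pvWordsOf, ht, hdq, h1,
              pvWordsA_prefix cs' [c] (by simp), h2]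
            simp

theorem pvStartA_eq (cs : List Char) : ∀ (buf : List Char),
    pvStartA buf cs =
      if (cs.dropWhile (fun x => x == '\t' || x == ' ')).isEmpty then
        (if (buf ++ cs).isEmpty then [] else [buf ++ cs])
      else
        (buf ++ cs.takeWhile (fun x => x == '\t' || x == ' ')
            ++ (cs.dropWhile (fun x => x == '\t' || x == ' ')).takeWhile
                (fun x => !(x == '\t' || x == ' ')))
          :: pvWordsOf (((cs.dropWhile (fun x => x == '\t' || x == ' ')).dropWhile
                (fun x => !(x == '\t' || x == ' '))).dropWhile (fun x => x == '\t' || x == ' ')) := by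
  induction cs with
  | nil =>
      intro buf
      simp [pvStartA]
  | cons c cs' ih =>
      intro buf
      by_cases hc : (c == '\t' || c == ' ') = true
      · have h1 : pvStartA buf (c :: cs') = pvStartA (buf ++ [c]) cs' := by
          simp [pvStartA, hc]
        rw [h1, ih (buf ++ [c])]
        rw [List.takeWhile_cons, List.dropWhile_cons, if_pos hc, if_pos hc]
        simp
      · have h1 : pvStartA buf (c :: cs') = pvWordsA (buf ++ [c]) cs' := by
          simp [pvStartA, hc]
        rw [h1, pvWordsA_prefix cs' (buf ++ [c]) (by simp)]
        rw [List.takeWhile_cons, List.dropWhile_cons, if_neg hc, if_neg hc]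
        simp only [List.isEmpty_cons, if_neg Bool.false_ne_true]
        rw [List.takeWhile_cons, List.dropWhile_cons]
        simp only [hc, Bool.not_false, if_pos]
        rw [pvWords_eq (cs'.dropWhile (fun x => !(x == '\t' || x == ' '))).length _ le_rfl]
        simp

theorem pvSplit_eq (line : String) : alignSplit line = alignSplitB line := by
  rw [pvAlignSplit_startA, pvStartA_eq]
  simp only [alignSplitB, List.nil_append]
  cases hd : line.toList.dropWhile (fun x => x == '\t' || x == ' ') with
  | nil =>
      simp only [hd]
      by_cases hl : line = ""
      · simp [hl]
      · simp [hl, String.ofList_toList]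
  | cons c rest =>
      simp only [hd]
      rw [pvWordsOf]
      simp

-- ===== A-side loop characterisations (width table and in-place row update) =====

theorem set_fold_eq_map (f : Int × String → String) :
    ∀ (line pre : List String),
    ((PySem.List.enumerate line (pre.length : Int)).foldl
        (fun l (p : Int × String) => l.set p.1.toNat (f p)) (pre ++ line))
      = pre ++ (PySem.List.enumerate line (pre.length : Int)).map f := by
  intro line
  induction line with
  | nil => intro pre; simp [PySem.List.enumerate_nil]
  | cons x xs ih =>
      intro pre
      rw [PySem.List.enumerate_cons]
      simp only [List.foldl_cons, List.map_cons]
      have hset : (pre ++ x :: xs).set (((pre.length : Int)).toNat) (f ((pre.length : Int), x))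
          = (pre ++ [f ((pre.length : Int), x)]) ++ xs := by
        rw [Int.toNat_natCast]
        rw [List.set_append_right _ _ (le_refl pre.length)]
        simp
      rw [hset]
      have hcast : ((pre.length : Int) + 1) = (((pre ++ [f ((pre.length : Int), x)]).length : Nat) : Int) := by
        simp
      rw [hcast, ih]
      simp

theorem le_foldl_max (ls : List (List String)) :
    ∀ (a : Nat), a ≤ ls.foldl (fun m l => max m l.length) a
      ∧ ∀ l ∈ ls, l.length ≤ ls.foldl (fun m l => max m l.length) a := by
  induction ls with
  | nil => intro a; simp
  | cons x xs ih =>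
      intro a
      simp only [List.foldl_cons, List.mem_cons]
      refine ⟨le_trans (le_max_left _ _) (ih _).1, ?_⟩
      rintro l (rfl | hl)
      · exact le_trans (le_max_right _ _) (ih _).1
      · exact (ih _).2 l hl

theorem width_fold_length (line : List String) :
    ∀ (s : Int) (a : List Nat),
    ((PySem.List.enumerate line s).foldl
        (fun a (p : Int × String) =>
          a.set p.1.toNat (max (a.getD p.1.toNat 0) (p.2.toList.length))) a).length
      = a.length := by
  induction line with
  | nil => intro s a; simp [PySem.List.enumerate_nil]
  | cons x xs ih =>
      intro s a
      rw [PySem.List.enumerate_cons]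
      simp only [List.foldl_cons]
      rw [ih]
      exact List.length_set

theorem width_fold_getD (line : List String) :
    ∀ (s : Nat) (a : List Nat), s + line.length ≤ a.length →
    ∀ j, ((PySem.List.enumerate line (s : Int)).foldl
        (fun a (p : Int × String) =>
          a.set p.1.toNat (max (a.getD p.1.toNat 0) (p.2.toList.length))) a).getD j 0
      = if s ≤ j ∧ j < s + line.length
        then max (a.getD j 0) ((line.getD (j - s) "").toList.length)
        else a.getD j 0 := by
  induction line with
  | nil => intro s a h j; simp [PySem.List.enumerate_nil]
  | cons x xs ih =>
      intro s a h j
      rw [PySem.List.enumerate_cons]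
      simp only [List.foldl_cons]
      have hcast : ((s : Int) + 1) = ((s + 1 : Nat) : Int) := by push_cast; ring
      rw [hcast]
      have hs : (s : Int).toNat = s := Int.toNat_natCast s
      rw [hs]
      have hlen' : (s + 1) + xs.length ≤ (a.set s (max (a.getD s 0) x.toList.length)).length := by
        rw [List.length_set]; simp at h ⊢; omega
      rw [ih (s+1) _ hlen' j]
      have hsa : s < a.length := by simp at h; omega
      have hset : ∀ v, (a.set s v).getD j 0 = if s = j then v else a.getD j 0 := by
        intro v
        simp only [List.getD_eq_getElem?_getD, List.getElem?_set, hsa, if_pos]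
        by_cases hj : s = j <;> simp [hj]
      by_cases hj : s = j
      · subst hj
        have h1 : ¬(s + 1 ≤ s ∧ s < s + 1 + xs.length) := by omega
        have h2 : s ≤ s ∧ s < s + (x :: xs).length := ⟨le_rfl, by simp only [List.length_cons]; omega⟩
        rw [if_neg h1, if_pos h2, hset]
        simp
      · rw [hset, if_neg hj]
        by_cases hc : s + 1 ≤ j ∧ j < s + 1 + xs.length
        · have h2 : s ≤ j ∧ j < s + (x :: xs).length := by simp only [List.length_cons]; omega
          rw [if_pos hc, if_pos h2]
          have : (x :: xs).getD (j - s) "" = xs.getD (j - (s+1)) "" := by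
            have h1 : j - s = (j - (s+1)) + 1 := by omega
            rw [h1]; simp [List.getD]
          rw [this]
        · have h2 : ¬(s ≤ j ∧ j < s + (x :: xs).length) := by simp only [List.length_cons]; omega
          rw [if_neg hc, if_neg h2]

theorem outer_width_getD (ls : List (List String)) :
    ∀ (a : List Nat), (∀ l ∈ ls, l.length ≤ a.length) →
    ∀ j, (ls.foldl (fun acc line =>
        (PySem.List.enumerate line).foldl
          (fun a (p : Int × String) =>
            a.set p.1.toNat (max (a.getD p.1.toNat 0) (p.2.toList.length))) acc) a).getD j 0
      = List.foldl max (a.getD j 0)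
          ((ls.filter (fun t => decide (j < t.length))).map (fun t => (t.getD j "").toList.length)) := by
  induction ls with
  | nil => intro a _ j; rfl
  | cons l ls ih =>
      intro a ha j
      simp only [List.foldl_cons]
      have hl : (0 : Nat) + l.length ≤ a.length := by
        simpa using ha l (List.mem_cons_self)
      have hinner := width_fold_getD l 0 a hl j
      simp only [Nat.cast_zero] at hinner
      have hlen : ∀ l' ∈ ls, l'.length ≤
          ((PySem.List.enumerate l).foldl
            (fun a (p : Int × String) =>
              a.set p.1.toNat (max (a.getD p.1.toNat 0) (p.2.toList.length))) a).length := by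
        intro l' hl'
        rw [width_fold_length]
        exact ha l' (List.mem_cons_of_mem _ hl')
      rw [ih _ hlen j, hinner]
      by_cases hc : j < l.length
      · rw [if_pos ⟨Nat.zero_le _, by omega⟩]
        rw [List.filter_cons_of_pos (by simpa using hc)]
        simp [List.foldl_cons]
      · rw [if_neg (by omega)]
        rw [List.filter_cons_of_neg (by simpa using hc)]

-- A's width table read pointwise = B's per-column width
theorem pvMll_getD (ls : List (List String)) (j : Nat) :
    (ls.foldl (fun acc line =>
        (PySem.List.enumerate line).foldl
          (fun a (p : Int × String) =>
            a.set p.1.toNat (max (a.getD p.1.toNat 0) (p.2.toList.length))) acc)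
      (List.replicate (ls.foldl (fun m l => max m l.length) 0) 0)).getD j 0
      = pvColWidth ls j := by
  have hml : ∀ l ∈ ls, l.length ≤ (List.replicate (ls.foldl (fun m l => max m l.length) 0) (0:Nat)).length := by
    intro l hl
    rw [List.length_replicate]
    exact (le_foldl_max ls 0).2 l hl
  rw [outer_width_getD ls _ hml j]
  have h0 : (List.replicate (ls.foldl (fun m l => max m l.length) 0) (0:Nat)).getD j 0 = 0 := by
    simp [List.getD_eq_getElem?_getD, List.getElem?_replicate]
    split <;> rfl
  rw [h0]
  rfl

-- ===== B-side: the column-streaming loop builds each row left to right =====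

-- the string B has built for row r after the first n columns
def pvBuild (rows : List (List String)) (r : List String) : Nat → List Char
  | 0 => []
  | c + 1 =>
    if r.length ≤ c then pvBuild rows r c
    else if c = 0 then (pvLjust (PySem.Str.rstrip (r.getD 0 "")) (pvColWidth rows 0)).toList
    else pvBuild rows r c ++ ' ' :: (pvLjust (PySem.Str.strip (r.getD c "")) (pvColWidth rows c)).toList

theorem pvZipSelf {α γ : Type} (h : α → α → γ) (l : List α) :
    List.zipWith h l l = l.map (fun a => h a a) := by
  induction l with
  | nil => rfl
  | cons x xs ih => simp [List.zipWith_cons_cons, ih]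

theorem pvInv (rows : List (List String)) (n : Nat) :
    (List.range n).foldl (pvColStep rows) (List.replicate rows.length "")
      = rows.map (fun r => String.ofList (pvBuild rows r n)) := by
  induction n with
  | zero =>
      have : rows.map (fun r => String.ofList (pvBuild rows r 0)) = rows.map (fun _ => "") := by
        simp [pvBuild]
      rw [this, List.map_const']
      rfl
  | succ n ih =>
      rw [List.range_succ, List.foldl_append, List.foldl_cons, List.foldl_nil, ih]
      show pvColStep rows (rows.map fun r => String.ofList (pvBuild rows r n)) n = _
      unfold pvColStep
      rw [List.zipWith_map_left, pvZipSelf]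
      apply List.map_congr_left
      intro r _
      by_cases hle : r.length ≤ n
      · rw [if_pos hle]
        have : pvBuild rows r (n + 1) = pvBuild rows r n := by
          rw [pvBuild, if_pos hle]
        rw [this]
      · rw [if_neg hle]
        by_cases hn : n = 0
        · subst hn
          have hb : pvBuild rows r (0 + 1) = (pvLjust (PySem.Str.rstrip (r.getD 0 "")) (pvColWidth rows 0)).toList := by
            rw [pvBuild, if_neg hle]
            simp
          simp [hb, String.ofList_toList]
        · have hb : pvBuild rows r (n + 1)
              = pvBuild rows r n ++ ' ' :: (pvLjust (PySem.Str.strip (r.getD n "")) (pvColWidth rows n)).toList := by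
            rw [pvBuild, if_neg hle, if_neg hn]
          simp [hb, hn, String.toList_ofList]

theorem pvBuild_stationary (rows : List (List String)) (r : List String) :
    ∀ n, r.length ≤ n → pvBuild rows r n = pvBuild rows r r.length := by
  intro n
  induction n with
  | zero => intro h; rw [Nat.le_zero.mp h]
  | succ n ih =>
      intro h
      by_cases hle : r.length ≤ n
      · rw [pvBuild, if_pos hle]
        exact ih hle
      · have : r.length = n + 1 := by omega
        rw [this]

theorem pvJoinSnoc (xs : List (List Char)) (y : List Char) (h : xs ≠ []) :
    PySem.Chars.join [' '] (xs ++ [y]) = PySem.Chars.join [' '] xs ++ ' ' :: y := by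
  induction xs with
  | nil => exact absurd rfl h
  | cons x xs ih =>
      cases xs with
      | nil =>
          show PySem.Chars.join [' '] [x, y] = PySem.Chars.join [' '] [x] ++ ' ' :: y
          rw [PySem.Chars.join_cons_cons, PySem.Chars.join_singleton, PySem.Chars.join_singleton]
          simp
      | cons x' xs' =>
          have ih' := ih (by simp)
          simp only [List.cons_append] at ih' ⊢
          rw [PySem.Chars.join_cons_cons, PySem.Chars.join_cons_cons, ih']
          simp

theorem pvBuild_join (rows : List (List String)) (r : List String) :
    ∀ k, k ≤ r.length →
    pvBuild rows r k = PySem.Chars.join [' ']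
      (((List.range k).map (fun i =>
        pvLjust (if i = 0 then PySem.Str.rstrip (r.getD i "") else PySem.Str.strip (r.getD i ""))
          (pvColWidth rows i))).map String.toList) := by
  intro k
  induction k with
  | zero =>
      intro _
      rw [List.range_zero]
      rfl
  | succ k ih =>
      intro h
      have hlt : ¬ r.length ≤ k := by omega
      rw [List.range_succ, List.map_append, List.map_append]
      by_cases hk : k = 0
      · subst hk
        have hb : pvBuild rows r (0 + 1) = (pvLjust (PySem.Str.rstrip (r.getD 0 "")) (pvColWidth rows 0)).toList := by
          rw [pvBuild, if_neg hlt]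
          simp
        rw [hb]
        simp [PySem.Chars.join_singleton]
      · have hb : pvBuild rows r (k + 1)
            = pvBuild rows r k ++ ' ' :: (pvLjust (PySem.Str.strip (r.getD k "")) (pvColWidth rows k)).toList := by
          rw [pvBuild, if_neg hlt, if_neg hk]
        rw [hb, ih (by omega)]
        simp only [List.map_cons, List.map_nil]
        rw [pvJoinSnoc _ _ (by simp [List.range_eq_nil, hk])]
        simp [hk]

-- enumerate-then-map as a map over range
theorem pvEnumMap (f : Int × String → String) (r : List String) :
    ∀ (s : Nat),
    (PySem.List.enumerate r (s : Int)).map f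
      = (List.range r.length).map (fun i => f (((s + i : Nat) : Int), r.getD i "")) := by
  induction r with
  | nil => intro s; simp [PySem.List.enumerate_nil]
  | cons x xs ih =>
      intro s
      rw [PySem.List.enumerate_cons]
      have hcast : ((s : Int) + 1) = ((s + 1 : Nat) : Int) := by push_cast; ring
      rw [List.map_cons, hcast, ih (s + 1)]
      simp only [List.length_cons]
      rw [List.range_succ_eq_map, List.map_cons, List.map_map]
      refine congrArg₂ List.cons (by simp) ?_
      apply List.map_congr_left
      intro i _
      simp only [Function.comp_apply, List.getD_cons_succ]
      congr 2
      push_cast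
      ring

-- ===== assembly =====

theorem pvRow_eq (rows : List (List String)) (r : List String) (hr : r ∈ rows) :
    PySem.Str.rstrip (PySem.Str.join " "
      ((PySem.List.enumerate r).foldl
        (fun l (p : Int × String) =>
          l.set p.1.toNat
            (if p.1 == 0 then pvLjust (PySem.Str.rstrip p.2)
                ((rows.foldl
                  (fun acc line =>
                    (PySem.List.enumerate line).foldl
                      (fun a (p : Int × String) =>
                        a.set p.1.toNat (max (a.getD p.1.toNat 0) (p.2.toList.length))) acc)
                  (List.replicate (rows.foldl (fun m l => max m l.length) 0) 0)).getD p.1.toNat 0)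
             else pvLjust (PySem.Str.strip p.2)
                ((rows.foldl
                  (fun acc line =>
                    (PySem.List.enumerate line).foldl
                      (fun a (p : Int × String) =>
                        a.set p.1.toNat (max (a.getD p.1.toNat 0) (p.2.toList.length))) acc)
                  (List.replicate (rows.foldl (fun m l => max m l.length) 0) 0)).getD p.1.toNat 0))) r))
    = PySem.Str.rstrip (String.ofList (pvBuild rows r (rows.foldl (fun m l => max m l.length) 0))) := by
  have hfold : ∀ (f : Int × String → String),
      (PySem.List.enumerate r).foldl (fun l (p : Int × String) => l.set p.1.toNat (f p)) r
        = (PySem.List.enumerate r).map f := by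
    intro f
    simpa using set_fold_eq_map f r []
  rw [hfold]
  have henum : ∀ (f : Int × String → String),
      (PySem.List.enumerate r).map f
        = (List.range r.length).map (fun i => f (((i : Nat) : Int), r.getD i "")) := by
    intro f
    have h := pvEnumMap f r 0
    simpa using h
  rw [henum]
  have hmapeq : (List.range r.length).map (fun i =>
      (if ((i : Nat) : Int) == 0 then pvLjust (PySem.Str.rstrip (r.getD i ""))
          ((rows.foldl
            (fun acc line =>
              (PySem.List.enumerate line).foldl
                (fun a (p : Int × String) =>
                  a.set p.1.toNat (max (a.getD p.1.toNat 0) (p.2.toList.length))) acc)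
            (List.replicate (rows.foldl (fun m l => max m l.length) 0) 0)).getD ((i : Nat) : Int).toNat 0)
       else pvLjust (PySem.Str.strip (r.getD i ""))
          ((rows.foldl
            (fun acc line =>
              (PySem.List.enumerate line).foldl
                (fun a (p : Int × String) =>
                  a.set p.1.toNat (max (a.getD p.1.toNat 0) (p.2.toList.length))) acc)
            (List.replicate (rows.foldl (fun m l => max m l.length) 0) 0)).getD ((i : Nat) : Int).toNat 0)))
      = (List.range r.length).map (fun i =>
          pvLjust (if i = 0 then PySem.Str.rstrip (r.getD i "") else PySem.Str.strip (r.getD i ""))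
            (pvColWidth rows i)) := by
    apply List.map_congr_left
    intro i _
    rw [Int.toNat_natCast, pvMll_getD]
    by_cases hi : i = 0
    · subst hi; simp
    · have h1 : (((i : Nat) : Int) == 0) = false := by
        simp [hi]
      rw [h1, if_neg hi]
      simp
  rw [hmapeq]
  have hNlen : r.length ≤ rows.foldl (fun m l => max m l.length) 0 := (le_foldl_max rows 0).2 r hr
  rw [pvBuild_stationary rows r _ hNlen, pvBuild_join rows r r.length le_rfl]
  have hjoin : PySem.Str.join " " ((List.range r.length).map (fun i =>
      pvLjust (if i = 0 then PySem.Str.rstrip (r.getD i "") else PySem.Str.strip (r.getD i ""))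
        (pvColWidth rows i)))
      = String.ofList (PySem.Chars.join [' ']
          (((List.range r.length).map (fun i =>
            pvLjust (if i = 0 then PySem.Str.rstrip (r.getD i "") else PySem.Str.strip (r.getD i ""))
              (pvColWidth rows i))).map String.toList)) := by
    have h1 : String.ofList ((PySem.Str.join " " ((List.range r.length).map (fun i =>
        pvLjust (if i = 0 then PySem.Str.rstrip (r.getD i "") else PySem.Str.strip (r.getD i ""))
          (pvColWidth rows i)))).toList)
        = PySem.Str.join " " ((List.range r.length).map (fun i =>
        pvLjust (if i = 0 then PySem.Str.rstrip (r.getD i "") else PySem.Str.strip (r.getD i ""))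
          (pvColWidth rows i))) := String.ofList_toList
    rw [← h1, PySem.Str.toList_join]
    rfl
  rw [hjoin]

-- ===== VERDICT (by name: the statement is the Claim_ definition above) =====
theorem align_fun_spec : Claim_equal_align_fun := by
  intro lines tag _
  show align_fun lines tag = align_fun_alt lines tag
  simp only [align_fun, align_fun_alt]
  have hrows : lines.map alignSplitB = lines.map alignSplit := by
    apply List.map_congr_left
    intro l _
    exact (pvSplit_eq l).symm
  rw [hrows]
  have hn : ((lines.map alignSplit).map List.length).foldl max 0
      = (lines.map alignSplit).foldl (fun m l => max m l.length) 0 := List.foldl_map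
  rw [hn, pvInv]
  generalize List.map alignSplit lines = rows
  rw [List.map_map, List.map_map]
  apply List.map_congr_left
  intro r hr
  simp only [Function.comp_apply]
  exact pvRow_eq rows r hr
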